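-- pv_equiv track=rewrite | github.com/Zachary-Levesque/AI-agents-workflows | tools/audit_workflows.py | score_workflow
-- ===== SOURCE A (Python) =====
-- from typing import Any
--
-- def collect_nodes(data: dict[str, Any]) -> list[dict[str, Any]]:
--     return data.get("nodes", [])
--
-- def node_types(nodes: list[dict[str, Any]]) -> list[str]:
--     return [node.get("type", "") for node in nodes]
--
-- def detect_triggers(nodes: list[dict[str, Any]]) -> list[str]:
--     triggers: list[str] = []
--     for node in nodes:
--         node_type = node.get("type", "")
--         if "manualTrigger" in node_type:
--             triggers.append("manual")
--         elif "scheduleTrigger" in node_type: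
--             triggers.append("scheduled")
--         elif "chatTrigger" in node_type:
--             triggers.append("chat")
--         elif "gmailTrigger" in node_type:
--             triggers.append("gmail")
--         elif "googleSheetsTrigger" in node_type:
--             triggers.append("sheets")
--         elif "googleDriveTrigger" in node_type:
--             triggers.append("drive")
--     return sorted(set(triggers))
--
-- def score_workflow(data: dict[str, Any], flags: list[str]) -> int:
--     nodes = collect_nodes(data)
--     types = node_types(nodes)
--     score = 45
--
--     if len(nodes) >= 5:
--         score += 5
--     if len(nodes) >= 8:
--         score += 5
--     if "@n8n/n8n-nodes-langchain.outputParserStructured" in types: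
--         score += 10
--     if "@n8n/n8n-nodes-langchain.vectorStorePinecone" in types:
--         score += 10
--     if any("trigger" in trigger for trigger in detect_triggers(nodes)):
--         score += 0
--     if len(detect_triggers(nodes)) > 0:
--         score += 5
--     if "schedule" in detect_triggers(nodes) or "gmail" in detect_triggers(nodes) or "sheets" in detect_triggers(nodes):
--         score += 5
--
--     penalties = {
--         "manual-only trigger": 10,
--         "agent without structured parser": 12,
--         "email side effect present": 4,
--         "writes to spreadsheet": 3,
--         "calendar side effect present": 4,
--         "contains placeholders to reconfigure": 2,
--         "custom code node present": 3,
--         "fragile string parsing": 8,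
--         "token passed in URL": 8,
--         "rag answer lacks source requirement": 10,
--     }
--     for flag in flags:
--         score -= penalties.get(flag, 0)
--
--     return max(0, min(100, score))
-- ===== SOURCE B (Python) =====
-- PENALTIES = {
--     "manual-only trigger": 10,
--     "agent without structured parser": 12,
--     "email side effect present": 4,
--     "writes to spreadsheet": 3,
--     "calendar side effect present": 4,
--     "contains placeholders to reconfigure": 2,
--     "custom code node present": 3,
--     "fragile string parsing": 8,
--     "token passed in URL": 8,
--     "rag answer lacks source requirement": 10,
-- }
--
-- def score_workflow(data, flags):
--     n = 0
--     has_parser = has_pinecone = has_trigger = has_gs = False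
--     for node in data.get("nodes", []):
--         n += 1
--         t = node.get("type", "")
--         if t == "@n8n/n8n-nodes-langchain.outputParserStructured":
--             has_parser = True
--         if t == "@n8n/n8n-nodes-langchain.vectorStorePinecone":
--             has_pinecone = True
--         if "manualTrigger" in t or "scheduleTrigger" in t or "chatTrigger" in t:
--             has_trigger = True
--         elif "gmailTrigger" in t or "googleSheetsTrigger" in t:
--             has_trigger = True
--             has_gs = True
--         elif "googleDriveTrigger" in t:
--             has_trigger = True
--     score = 45
--     if n >= 5:
--         score += 5
--     if n >= 8:
--         score += 5
--     if has_parser: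
--         score += 10
--     if has_pinecone:
--         score += 10
--     if has_trigger:
--         score += 5
--     if has_gs:
--         score += 5
--     score -= sum(PENALTIES.get(f, 0) for f in flags)
--     return max(0, min(100, score))
-- ===== Notes on version B (the rewrite author's own statement) =====
-- stated objective: simpler
-- what changed: B replaces A's multi-pass design (types list, detect_triggers called three times with sorted(set(...))) by a single pass over the nodes maintaining a count and four booleans, then assembles the score once.
import Mathlib
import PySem

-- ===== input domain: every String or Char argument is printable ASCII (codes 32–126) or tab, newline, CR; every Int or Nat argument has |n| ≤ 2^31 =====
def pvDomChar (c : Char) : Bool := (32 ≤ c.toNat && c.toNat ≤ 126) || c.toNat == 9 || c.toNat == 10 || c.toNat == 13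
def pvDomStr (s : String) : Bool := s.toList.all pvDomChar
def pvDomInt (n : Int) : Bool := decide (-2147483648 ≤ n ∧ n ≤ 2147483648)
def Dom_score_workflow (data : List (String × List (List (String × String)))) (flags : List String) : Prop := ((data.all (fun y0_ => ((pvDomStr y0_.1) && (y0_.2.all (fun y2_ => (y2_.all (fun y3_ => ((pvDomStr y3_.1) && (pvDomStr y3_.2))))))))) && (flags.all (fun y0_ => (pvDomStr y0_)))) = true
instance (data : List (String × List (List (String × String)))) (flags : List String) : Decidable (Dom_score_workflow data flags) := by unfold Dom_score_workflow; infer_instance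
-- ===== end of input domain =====

-- B is a single pass over the nodes maintaining count and four booleans, replacing A's
-- repeated detect_triggers/sorted(set(...)) passes; objective: simpler (same asymptotic cost).

-- ===== PORT A =====
def collect_nodes (data : List (String × List (List (String × String)))) : List (List (String × String)) :=
  (PySem.Dict.mk data).getD "nodes" []

def node_types (nodes : List (List (String × String))) : List String :=
  nodes.map (fun node => (PySem.Dict.mk node).getD "type" "")

def detect_triggers (nodes : List (List (String × String))) : List String :=
  let triggers := nodes.foldl (fun triggers node =>
    let node_type := (PySem.Dict.mk node).getD "type" ""
    if PySem.Str.isIn "manualTrigger" node_type then triggers ++ ["manual"]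
    else if PySem.Str.isIn "scheduleTrigger" node_type then triggers ++ ["scheduled"]
    else if PySem.Str.isIn "chatTrigger" node_type then triggers ++ ["chat"]
    else if PySem.Str.isIn "gmailTrigger" node_type then triggers ++ ["gmail"]
    else if PySem.Str.isIn "googleSheetsTrigger" node_type then triggers ++ ["sheets"]
    else if PySem.Str.isIn "googleDriveTrigger" node_type then triggers ++ ["drive"]
    else triggers) []
  PySem.List.sorted (PySem.Set.ofList triggers) (fun x => x) false

def pvPenalties : PySem.Dict String Int := PySem.Dict.ofList
  [("manual-only trigger", 10), ("agent without structured parser", 12),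
   ("email side effect present", 4), ("writes to spreadsheet", 3),
   ("calendar side effect present", 4), ("contains placeholders to reconfigure", 2),
   ("custom code node present", 3), ("fragile string parsing", 8),
   ("token passed in URL", 8), ("rag answer lacks source requirement", 10)]

def score_workflow (data : List (String × List (List (String × String)))) (flags : List String) : Int :=
  let nodes := collect_nodes data
  let types := node_types nodes
  let score : Int := 45
  let score := if nodes.length ≥ 5 then score + 5 else score
  let score := if nodes.length ≥ 8 then score + 5 else score
  let score := if types.contains "@n8n/n8n-nodes-langchain.outputParserStructured" then score + 10 else score
  let score := if types.contains "@n8n/n8n-nodes-langchain.vectorStorePinecone" then score + 10 else score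
  let score := if (detect_triggers nodes).any (fun trigger => PySem.Str.isIn "trigger" trigger) then score + 0 else score
  let score := if (detect_triggers nodes).length > 0 then score + 5 else score
  let score := if (detect_triggers nodes).contains "schedule" || (detect_triggers nodes).contains "gmail" || (detect_triggers nodes).contains "sheets" then score + 5 else score
  let score := flags.foldl (fun score flag => score - pvPenalties.getD flag 0) score
  max 0 (min 100 score)

-- ===== PORT B =====
-- state: (n, has_parser, has_pinecone, has_trigger, has_gs)
def pvStep (st : Int × Bool × Bool × Bool × Bool) (node : List (String × String)) :
    Int × Bool × Bool × Bool × Bool :=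
  let t := (PySem.Dict.mk node).getD "type" ""
  let n := st.1 + 1
  let hp := if t == "@n8n/n8n-nodes-langchain.outputParserStructured" then true else st.2.1
  let hpc := if t == "@n8n/n8n-nodes-langchain.vectorStorePinecone" then true else st.2.2.1
  let tg :=
    if PySem.Str.isIn "manualTrigger" t || PySem.Str.isIn "scheduleTrigger" t || PySem.Str.isIn "chatTrigger" t then
      (true, st.2.2.2.2)
    else if PySem.Str.isIn "gmailTrigger" t || PySem.Str.isIn "googleSheetsTrigger" t then
      (true, true)
    else if PySem.Str.isIn "googleDriveTrigger" t then
      (true, st.2.2.2.2)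
    else (st.2.2.2.1, st.2.2.2.2)
  (n, hp, hpc, tg.1, tg.2)

def score_workflow_alt (data : List (String × List (List (String × String)))) (flags : List String) : Int :=
  let st := ((PySem.Dict.mk data).getD "nodes" []).foldl pvStep ((0 : Int), false, false, false, false)
  let score : Int := 45
  let score := if st.1 ≥ 5 then score + 5 else score
  let score := if st.1 ≥ 8 then score + 5 else score
  let score := if st.2.1 then score + 10 else score
  let score := if st.2.2.1 then score + 10 else score
  let score := if st.2.2.2.1 then score + 5 else score
  let score := if st.2.2.2.2 then score + 5 else score
  let score := score - (flags.map (fun f => pvPenalties.getD f 0)).sum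
  max 0 (min 100 score)

-- ===== PRECONDITION & SPEC =====
def Spec_score_workflow (data : List (String × List (List (String × String)))) (flags : List String) (out : Int) : Prop := out = score_workflow_alt data flags
instance (data : List (String × List (List (String × String)))) (flags : List String) (out : Int) : Decidable (Spec_score_workflow data flags out) := by unfold Spec_score_workflow; infer_instance

-- ===== CLAIM (what is proved, stated in full; the proofs are below) =====
def Claim_equal_score_workflow : Prop := ∀ (data : List (String × List (List (String × String)))) (flags : List String), Dom_score_workflow data flags → Spec_score_workflow data flags (score_workflow data flags)

-- ===== LEMMAS AND PROOFS =====

-- the label A's elif chain assigns to a node type (none = no trigger label)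
def pvCls (t : String) : Option String :=
  if PySem.Str.isIn "manualTrigger" t then some "manual"
  else if PySem.Str.isIn "scheduleTrigger" t then some "scheduled"
  else if PySem.Str.isIn "chatTrigger" t then some "chat"
  else if PySem.Str.isIn "gmailTrigger" t then some "gmail"
  else if PySem.Str.isIn "googleSheetsTrigger" t then some "sheets"
  else if PySem.Str.isIn "googleDriveTrigger" t then some "drive"
  else none

def pvType (node : List (String × String)) : String := (PySem.Dict.mk node).getD "type" ""

def pvLabels (nodes : List (List (String × String))) : List String :=
  nodes.flatMap (fun node => (pvCls (pvType node)).toList)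

lemma pvLabels_mem_range {nodes : List (List (String × String))} {x : String}
    (hx : x ∈ pvLabels nodes) :
    x = "manual" ∨ x = "scheduled" ∨ x = "chat" ∨ x = "gmail" ∨ x = "sheets" ∨ x = "drive" := by
  simp only [pvLabels, List.mem_flatMap] at hx
  obtain ⟨node, _, hx⟩ := hx
  unfold pvCls at hx
  split_ifs at hx <;> simp_all

lemma detect_triggers_eq (nodes : List (List (String × String))) :
    detect_triggers nodes = PySem.List.sorted (PySem.Set.ofList (pvLabels nodes)) (fun x => x) false := by
  unfold detect_triggers
  have hcong := PySem.List.foldl_congr_mem (l := nodes) (init := ([] : List String))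
    (f := fun triggers node =>
      let node_type := (PySem.Dict.mk node).getD "type" ""
      if PySem.Str.isIn "manualTrigger" node_type then triggers ++ ["manual"]
      else if PySem.Str.isIn "scheduleTrigger" node_type then triggers ++ ["scheduled"]
      else if PySem.Str.isIn "chatTrigger" node_type then triggers ++ ["chat"]
      else if PySem.Str.isIn "gmailTrigger" node_type then triggers ++ ["gmail"]
      else if PySem.Str.isIn "googleSheetsTrigger" node_type then triggers ++ ["sheets"]
      else if PySem.Str.isIn "googleDriveTrigger" node_type then triggers ++ ["drive"]
      else triggers)
    (g := fun acc node => acc ++ (pvCls (pvType node)).toList)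
    (by intro acc node _
        simp only [pvCls, pvType]
        split_ifs <;> simp)
  rw [hcong, PySem.List.foldl_append_eq_flatMap]
  rfl

lemma mem_detect_triggers (nodes : List (List (String × String))) (x : String) :
    x ∈ detect_triggers nodes ↔ x ∈ pvLabels nodes := by
  rw [detect_triggers_eq, PySem.List.mem_sorted, PySem.Set.mem_ofList]

lemma detect_triggers_eq_nil_iff (nodes : List (List (String × String))) :
    detect_triggers nodes = [] ↔ pvLabels nodes = [] := by
  rw [detect_triggers_eq, PySem.List.sorted_eq_nil_iff]
  constructor
  · intro h
    cases hl : pvLabels nodes with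
    | nil => rfl
    | cons a l => rw [hl, PySem.Set.ofList_cons] at h; simp at h
  · intro h; rw [h]; rfl

-- the trigger if-chain of one B step, phrased through A's classification
lemma tg_eq (t : String) (ht hg : Bool) :
    (if PySem.Str.isIn "manualTrigger" t || PySem.Str.isIn "scheduleTrigger" t || PySem.Str.isIn "chatTrigger" t then
      (true, hg)
    else if PySem.Str.isIn "gmailTrigger" t || PySem.Str.isIn "googleSheetsTrigger" t then
      (true, true)
    else if PySem.Str.isIn "googleDriveTrigger" t then
      (true, hg)
    else (ht, hg)) =
    (ht || (pvCls t).isSome, hg || (pvCls t == some "gmail" || pvCls t == some "sheets")) := by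
  cases h1 : PySem.Str.isIn "manualTrigger" t <;>
  cases h2 : PySem.Str.isIn "scheduleTrigger" t <;>
  cases h3 : PySem.Str.isIn "chatTrigger" t <;>
  cases h4 : PySem.Str.isIn "gmailTrigger" t <;>
  cases h5 : PySem.Str.isIn "googleSheetsTrigger" t <;>
  cases h6 : PySem.Str.isIn "googleDriveTrigger" t <;>
  simp only [pvCls, h1, h2, h3, h4, h5, h6] <;> simp

-- one step of B's fold, phrased with ||
lemma pvStep_eq (st : Int × Bool × Bool × Bool × Bool) (node : List (String × String)) :
    pvStep st node =
      (st.1 + 1,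
       st.2.1 || (pvType node == "@n8n/n8n-nodes-langchain.outputParserStructured"),
       st.2.2.1 || (pvType node == "@n8n/n8n-nodes-langchain.vectorStorePinecone"),
       st.2.2.2.1 || (pvCls (pvType node)).isSome,
       st.2.2.2.2 || (pvCls (pvType node) == some "gmail" || pvCls (pvType node) == some "sheets")) := by
  dsimp only [pvStep]
  rw [show (PySem.Dict.mk node).getD "type" "" = pvType node from rfl]
  rw [Prod.mk.eta, tg_eq (pvType node) st.2.2.2.1 st.2.2.2.2]
  simp only [pvType, Bool.if_true_left]
  simp [Bool.or_comm]
  constructor <;> congr 1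

-- characterization of B's fold
lemma pvFold_spec (nodes : List (List (String × String))) (n : Int) (hp hpc ht hg : Bool) :
    nodes.foldl pvStep (n, hp, hpc, ht, hg) =
      (n + nodes.length,
       hp || nodes.any (fun node => pvType node == "@n8n/n8n-nodes-langchain.outputParserStructured"),
       hpc || nodes.any (fun node => pvType node == "@n8n/n8n-nodes-langchain.vectorStorePinecone"),
       ht || nodes.any (fun node => (pvCls (pvType node)).isSome),
       hg || nodes.any (fun node => pvCls (pvType node) == some "gmail" || pvCls (pvType node) == some "sheets")) := by
  induction nodes generalizing n hp hpc ht hg with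
  | nil => simp
  | cons node rest ih =>
    rw [List.foldl_cons, pvStep_eq, ih]
    simp only [List.length_cons, List.any_cons]
    refine Prod.ext ?_ (Prod.ext ?_ (Prod.ext ?_ (Prod.ext ?_ ?_))) <;> simp only
    · push_cast; ring
    · rw [Bool.or_assoc]
    · rw [Bool.or_assoc]
    · rw [Bool.or_assoc]
    · rw [Bool.or_assoc]

lemma pvPenalty_foldl (flags : List String) (s : Int) :
    flags.foldl (fun score flag => score - pvPenalties.getD flag 0) s =
      s - (flags.map (fun f => pvPenalties.getD f 0)).sum := by
  induction flags generalizing s with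
  | nil => simp
  | cons f rest ih => simp [ih]; ring

lemma pvLabels_ne_nil_iff (nodes : List (List (String × String))) :
    (pvLabels nodes ≠ []) ↔ nodes.any (fun node => (pvCls (pvType node)).isSome) = true := by
  rw [← List.isEmpty_eq_false_iff, List.isEmpty_eq_false_iff_exists_mem]
  simp only [pvLabels, List.mem_flatMap, List.any_eq_true, Option.mem_toList, Option.isSome_iff_exists]
  constructor
  · rintro ⟨x, node, hn, hx⟩; exact ⟨node, hn, x, hx⟩
  · rintro ⟨node, hn, x, hx⟩; exact ⟨x, node, hn, hx⟩

lemma pvGmailSheets_iff (nodes : List (List (String × String))) :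
    ("gmail" ∈ pvLabels nodes ∨ "sheets" ∈ pvLabels nodes) ↔
      nodes.any (fun node => pvCls (pvType node) == some "gmail" || pvCls (pvType node) == some "sheets") = true := by
  simp only [pvLabels, List.mem_flatMap, List.any_eq_true, Bool.or_eq_true, beq_iff_eq,
    Option.mem_toList]
  constructor
  · rintro (⟨node, hn, hx⟩ | ⟨node, hn, hx⟩)
    · exact ⟨node, hn, Or.inl hx⟩
    · exact ⟨node, hn, Or.inr hx⟩
  · rintro ⟨node, hn, hx | hx⟩
    · exact Or.inl ⟨node, hn, hx⟩
    · exact Or.inr ⟨node, hn, hx⟩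

-- ===== VERDICT (by name: the statement is the Claim_ definition above) =====
theorem score_workflow_spec : Claim_equal_score_workflow := by
  intro data flags _
  unfold Spec_score_workflow score_workflow score_workflow_alt
  dsimp only
  rw [pvFold_spec]
  set nodes := (PySem.Dict.mk data).getD "nodes" [] with hnodes
  have hcoll : collect_nodes data = nodes := rfl
  rw [hcoll, pvPenalty_foldl]
  simp only [Int.zero_add, Bool.false_or]
  -- the +0 branch of A collapses
  have h0 : ∀ (s : Int), (if (detect_triggers nodes).any (fun trigger => PySem.Str.isIn "trigger" trigger) then s + 0 else s) = s := by
    intro s; split <;> simp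
  rw [h0]
  -- node-count conditions agree up to the Nat→Int cast
  have h5 : ((nodes.length : Int) ≥ 5) ↔ (nodes.length ≥ 5) := by exact_mod_cast Iff.rfl
  have h8 : ((nodes.length : Int) ≥ 8) ↔ (nodes.length ≥ 8) := by exact_mod_cast Iff.rfl
  -- type-list membership is an any over the nodes
  have htypes : ∀ (v : String), (node_types nodes).contains v =
      nodes.any (fun node => pvType node == v) := by
    intro v; rw [Bool.eq_iff_iff]; simp [node_types, pvType]
  -- detect_triggers nonempty ↔ some node classifies
  have hlen : ((detect_triggers nodes).length > 0) ↔
      nodes.any (fun node => (pvCls (pvType node)).isSome) = true := by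
    rw [gt_iff_lt, List.length_pos_iff, Ne, detect_triggers_eq_nil_iff, ← pvLabels_ne_nil_iff]
  -- the sched/gmail/sheets condition is B's has_gs boolean
  have hgs : ((detect_triggers nodes).contains "schedule" || (detect_triggers nodes).contains "gmail" || (detect_triggers nodes).contains "sheets") =
      nodes.any (fun node => pvCls (pvType node) == some "gmail" || pvCls (pvType node) == some "sheets") := by
    rw [Bool.eq_iff_iff]
    simp only [Bool.or_eq_true, List.contains_iff_mem, mem_detect_triggers]
    rw [← pvGmailSheets_iff]
    constructor
    · rintro ((h | h) | h)
      · rcases pvLabels_mem_range h with h' | h' | h' | h' | h' | h' <;> simp_all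
      · exact Or.inl h
      · exact Or.inr h
    · rintro (h | h)
      · exact Or.inl (Or.inr h)
      · exact Or.inr h
  simp only [htypes, h5, h8, hlen, hgs]
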